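-- pv_equiv track=rewrite | github.com/imamiii/BigDataMovie | BigDataMovie/network_builder.py | _pick_primary_role
-- ===== SOURCE A (Python) =====
-- def _pick_primary_role(roles_set):
--     """兼容旧逻辑：多身份时给一个主角色（优先 director > writer > actor）"""
--     if not roles_set:
--         return "unknown"
--     priority = ["director", "writer", "actor"]
--     for r in priority:
--         if r in roles_set:
--             return r
--     return roles_set[0]
-- ===== SOURCE B (Python) =====
-- def _pick_primary_role(roles_set):
--     """One pass over the data with a rank table (director > writer > actor)."""
--     if not roles_set:
--         return "unknown"
--     rank = {"director": 0, "writer": 1, "actor": 2}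
--     best = None
--     for r in roles_set:
--         k = rank.get(r)
--         if k is not None and (best is None or k < best[0]):
--             best = (k, r)
--     return best[1] if best is not None else roles_set[0]
-- ===== Notes on version B (the rewrite author's own statement) =====
-- stated objective: alternative
-- what changed: Replaces the loop over the priority list with membership tests by a single pass over the input that keeps the best-ranked role via a rank table.
import Mathlib
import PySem

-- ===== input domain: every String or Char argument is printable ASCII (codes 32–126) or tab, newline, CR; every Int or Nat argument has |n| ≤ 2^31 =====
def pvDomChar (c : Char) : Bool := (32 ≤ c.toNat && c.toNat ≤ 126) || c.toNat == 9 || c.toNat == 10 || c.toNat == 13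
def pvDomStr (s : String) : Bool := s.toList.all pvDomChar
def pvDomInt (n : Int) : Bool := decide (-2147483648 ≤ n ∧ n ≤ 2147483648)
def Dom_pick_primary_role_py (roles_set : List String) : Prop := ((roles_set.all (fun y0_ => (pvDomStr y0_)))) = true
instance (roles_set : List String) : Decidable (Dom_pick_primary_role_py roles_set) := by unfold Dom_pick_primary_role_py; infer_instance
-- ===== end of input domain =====

-- B replaces A's loop over the priority list by one pass over the input keeping the best-ranked role (alternative decomposition, same result).

-- ===== PORT A =====
-- for r in priority: if r in roles_set: return r  — a find over the priority list
def pick_primary_role_py (roles_set : List String) : String :=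
  match roles_set with
  | [] => "unknown"
  | x :: _ =>
    match (["director", "writer", "actor"]).find? (fun r => roles_set.contains r) with
    | some r => r
    | none => x        -- roles_set[0]; the list is nonempty here, exactly as in A

-- ===== PORT B =====
-- rank = {"director": 0, "writer": 1, "actor": 2}
def pvRank : PySem.Dict String Int := PySem.Dict.ofList [("director", 0), ("writer", 1), ("actor", 2)]

-- loop body: k = rank.get(r); skip if None, else keep the strictly smaller rank
def pvStep (best : Option (Int × String)) (r : String) : Option (Int × String) :=
  match PySem.Dict.get? pvRank r with
  | none => best
  | some k =>
    match best with
    | none => some (k, r)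
    | some b => if k < b.1 then some (k, r) else best

def pick_primary_role_py_alt (roles_set : List String) : String :=
  match roles_set with
  | [] => "unknown"
  | x :: _ =>
    match roles_set.foldl pvStep none with
    | some b => b.2
    | none => x

-- ===== PRECONDITION & SPEC =====
def Spec_pick_primary_role_py (roles_set : List String) (out : String) : Prop := out = pick_primary_role_py_alt roles_set
instance (roles_set : List String) (out : String) : Decidable (Spec_pick_primary_role_py roles_set out) := by unfold Spec_pick_primary_role_py; infer_instance

-- ===== CLAIM (what is proved, stated in full; the proofs are below) =====
def Claim_equal_pick_primary_role_py : Prop := ∀ (roles_set : List String), Dom_pick_primary_role_py roles_set → Spec_pick_primary_role_py roles_set (pick_primary_role_py roles_set)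

-- ===== LEMMAS AND PROOFS =====

-- closed form of B's fold result in terms of membership
def pvSpecF (xs : List String) : Option (Int × String) :=
  if "director" ∈ xs then some (0, "director")
  else if "writer" ∈ xs then some (1, "writer")
  else if "actor" ∈ xs then some (2, "actor")
  else none

-- the only accumulator values the fold ever produces
def pvAccOK (a : Option (Int × String)) : Prop :=
  a = none ∨ a = some (0, "director") ∨ a = some (1, "writer") ∨ a = some (2, "actor")

def pvCombine (a b : Option (Int × String)) : Option (Int × String) :=
  match b with
  | none => a
  | some q =>
    match a with
    | none => b
    | some p => if q.1 < p.1 then b else a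

lemma pvStep_other (x : String) (h1 : ¬ x = "director") (h2 : ¬ x = "writer")
    (h3 : ¬ x = "actor") (a : Option (Int × String)) : pvStep a x = a := by
  have hg : PySem.Dict.get? pvRank x = none := by
    simp [pvRank, pysem]
    rw [show (PySem.Dict.ofList [("director", (0:Int)), ("writer", 1), ("actor", 2)]).keys
          = ["director", "writer", "actor"] from by decide]
    simp [h1, h2, h3]
  simp [pvStep, hg]

lemma pvS1 : pvStep (none) "director" = some (0, "director") := by decide
lemma pvS2 : pvStep (some (0, "director")) "director" = some (0, "director") := by decide
lemma pvS3 : pvStep (some (1, "writer")) "director" = some (0, "director") := by decide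
lemma pvS4 : pvStep (some (2, "actor")) "director" = some (0, "director") := by decide
lemma pvS5 : pvStep (none) "writer" = some (1, "writer") := by decide
lemma pvS6 : pvStep (some (0, "director")) "writer" = some (0, "director") := by decide
lemma pvS7 : pvStep (some (1, "writer")) "writer" = some (1, "writer") := by decide
lemma pvS8 : pvStep (some (2, "actor")) "writer" = some (1, "writer") := by decide
lemma pvS9 : pvStep (none) "actor" = some (2, "actor") := by decide
lemma pvS10 : pvStep (some (0, "director")) "actor" = some (0, "director") := by decide
lemma pvS11 : pvStep (some (1, "writer")) "actor" = some (1, "writer") := by decide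
lemma pvS12 : pvStep (some (2, "actor")) "actor" = some (2, "actor") := by decide

lemma pvFold_inv (xs : List String) : ∀ a, pvAccOK a →
    xs.foldl pvStep a = pvCombine a (pvSpecF xs) := by
  induction xs with
  | nil => intro a _; cases a <;> rfl
  | cons x xs ih =>
    intro a ha
    by_cases h1 : x = "director"
    · subst h1
      have hok : pvAccOK (pvStep a "director") := by
        unfold pvAccOK
        rcases ha with h|h|h|h <;> subst h <;> decide
      have hrec : ("director" :: xs).foldl pvStep a
          = pvCombine (pvStep a "director") (pvSpecF xs) := by
        simpa using ih (pvStep a "director") hok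
      rw [hrec]
      rcases ha with h|h|h|h <;> subst h <;>
        by_cases hd : "director" ∈ xs <;> by_cases hw : "writer" ∈ xs <;>
        by_cases hc : "actor" ∈ xs <;>
        simp [pvSpecF, pvCombine, hd, hw, hc, pvS1, pvS2, pvS3, pvS4]
    · by_cases h2 : x = "writer"
      · subst h2
        have hok : pvAccOK (pvStep a "writer") := by
          unfold pvAccOK
          rcases ha with h|h|h|h <;> subst h <;> decide
        have hrec : ("writer" :: xs).foldl pvStep a
            = pvCombine (pvStep a "writer") (pvSpecF xs) := by
          simpa using ih (pvStep a "writer") hok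
        rw [hrec]
        rcases ha with h|h|h|h <;> subst h <;>
          by_cases hd : "director" ∈ xs <;> by_cases hw : "writer" ∈ xs <;>
          by_cases hc : "actor" ∈ xs <;>
          simp [pvSpecF, pvCombine, hd, hw, hc, pvS5, pvS6, pvS7, pvS8]
      · by_cases h3 : x = "actor"
        · subst h3
          have hok : pvAccOK (pvStep a "actor") := by
            unfold pvAccOK
            rcases ha with h|h|h|h <;> subst h <;> decide
          have hrec : ("actor" :: xs).foldl pvStep a
              = pvCombine (pvStep a "actor") (pvSpecF xs) := by
            simpa using ih (pvStep a "actor") hok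
          rw [hrec]
          rcases ha with h|h|h|h <;> subst h <;>
            by_cases hd : "director" ∈ xs <;> by_cases hw : "writer" ∈ xs <;>
            by_cases hc : "actor" ∈ xs <;>
            simp [pvSpecF, pvCombine, hd, hw, hc, pvS9, pvS10, pvS11, pvS12]
        · have hok : pvAccOK (pvStep a x) := by rw [pvStep_other x h1 h2 h3]; exact ha
          have hrec : (x :: xs).foldl pvStep a = pvCombine (pvStep a x) (pvSpecF xs) := by
            simpa using ih (pvStep a x) hok
          rw [hrec, pvStep_other x h1 h2 h3]
          have n1 : ¬ ("director" = x) := fun h => h1 h.symm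
          have n2 : ¬ ("writer" = x) := fun h => h2 h.symm
          have n3 : ¬ ("actor" = x) := fun h => h3 h.symm
          have hs : pvSpecF (x :: xs) = pvSpecF xs := by
            simp [pvSpecF, n1, n2, n3]
          rw [hs]

lemma pvFold_eq (xs : List String) : xs.foldl pvStep none = pvSpecF xs := by
  rw [pvFold_inv xs none (Or.inl rfl)]
  cases h : pvSpecF xs <;> simp [pvCombine]

-- ===== VERDICT (by name: the statement is the Claim_ definition above) =====
theorem pick_primary_role_py_spec : Claim_equal_pick_primary_role_py := by
  intro roles_set _
  unfold Spec_pick_primary_role_py pick_primary_role_py pick_primary_role_py_alt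
  cases roles_set with
  | nil => rfl
  | cons x xs =>
    rw [pvFold_eq]
    by_cases h1 : "director" ∈ x :: xs
    · simp [pvSpecF, h1, List.find?]
    · by_cases h2 : "writer" ∈ x :: xs
      · simp [pvSpecF, h1, h2, List.find?]
      · by_cases h3 : "actor" ∈ x :: xs
        · simp [pvSpecF, h1, h2, h3, List.find?]
        · simp [pvSpecF, h1, h2, h3, List.find?]
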